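-- pv_equiv track=rewrite | github.com/dallals/konaclaw | kc-terminal/src/kc_terminal/classifier.py | _pad_shell_metachars
-- ===== SOURCE A (Python) =====
-- def _pad_shell_metachars(s: str) -> str:
--     """Insert spaces around shell metacharacters (|, ;, &, >, <) outside quotes
--     and backslash-escapes, so a subsequent shlex.split yields each operator as
--     its own token. Multi-char operators (&&, ||, >>, 2>, &>, &>>, 1>>, 2>>) are
--     kept intact."""
--     out: list[str] = []
--     i = 0
--     n = len(s)
--     in_squote = False
--     in_dquote = False
--     while i < n:
--         c = s[i]
--         if in_squote:
--             out.append(c)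
--             if c == "'":
--                 in_squote = False
--             i += 1
--             continue
--         if in_dquote:
--             if c == "\\" and i + 1 < n:
--                 out.append(c)
--                 out.append(s[i + 1])
--                 i += 2
--                 continue
--             out.append(c)
--             if c == '"':
--                 in_dquote = False
--             i += 1
--             continue
--         # Backslash escape outside quotes: pass next char through verbatim
--         # so that e.g. `find ... \;` does not get its semicolon padded.
--         if c == "\\" and i + 1 < n:
--             out.append(c)
--             out.append(s[i + 1])
--             i += 2
--             continue
--         if c == "'":
--             in_squote = True
--             out.append(c)
--             i += 1
--             continue
--         if c == '"':
--             in_dquote = True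
--             out.append(c)
--             i += 1
--             continue
--         three = s[i:i + 3]
--         if three in ("&>>", "1>>", "2>>"):
--             out.append(" ")
--             out.append(three)
--             out.append(" ")
--             i += 3
--             continue
--         two = s[i:i + 2]
--         if two in ("&&", "||", ">>", ">|", "<>", "&>", "1>", "2>"):
--             out.append(" ")
--             out.append(two)
--             out.append(" ")
--             i += 2
--             continue
--         if c in "|;&<>":
--             out.append(" ")
--             out.append(c)
--             out.append(" ")
--             i += 1
--             continue
--         out.append(c)
--         i += 1
--     return "".join(out)
-- ===== SOURCE B (Python) =====
-- _OPS = ("&>>", "1>>", "2>>", "&&", "||", ">>", ">|", "<>", "&>", "1>", "2>")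
--
-- def _pad_shell_metachars(s: str) -> str:
--     """Span-based rewrite: slice whole quoted runs with find/scan, pad the
--     longest operator prefix found in a table, copy everything else."""
--     parts: list[str] = []
--     i, n = 0, len(s)
--     while i < n:
--         c = s[i]
--         if c == "'":
--             j = s.find("'", i + 1)
--             j = n if j < 0 else j + 1
--             parts.append(s[i:j])
--             i = j
--         elif c == '"':
--             j = i + 1
--             while j < n and s[j] != '"':
--                 j += 2 if (s[j] == "\\" and j + 1 < n) else 1
--             parts.append(s[i:j + 1])  # slice clamps at n for an unterminated quote
--             i = j + 1
--         elif c == "\\":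
--             parts.append(s[i:i + 2])  # escape pair, or a lone trailing backslash
--             i += 2
--         else:
--             for op in _OPS:
--                 if s.startswith(op, i):
--                     parts.append(" " + op + " ")
--                     i += len(op)
--                     break
--             else:
--                 parts.append(" " + c + " " if c in "|;&<>" else c)
--                 i += 1
--     return "".join(parts)
-- ===== Notes on version B (the rewrite author's own statement) =====
-- stated objective: alternative
-- what changed: Replaces A's char-by-char state machine (in_squote/in_dquote booleans stepped one index at a time) with a span-based scanner: whole quoted runs are sliced in one step (str.find for single quotes, a dedicated scan for double quotes), escape pairs are copied as two-char slices, and operators are recognised by one longest-first prefix table instead of separate 3-char/2-char/1-char slice tests.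
import Mathlib
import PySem

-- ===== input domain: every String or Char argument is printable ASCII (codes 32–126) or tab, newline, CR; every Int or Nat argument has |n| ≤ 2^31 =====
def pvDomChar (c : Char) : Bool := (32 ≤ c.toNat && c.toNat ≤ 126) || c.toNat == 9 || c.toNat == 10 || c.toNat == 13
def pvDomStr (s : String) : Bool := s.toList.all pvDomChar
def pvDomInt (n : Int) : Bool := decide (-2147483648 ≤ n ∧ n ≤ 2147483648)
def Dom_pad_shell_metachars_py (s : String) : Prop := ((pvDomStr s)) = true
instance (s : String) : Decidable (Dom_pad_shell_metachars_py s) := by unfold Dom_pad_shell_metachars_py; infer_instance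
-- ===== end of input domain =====

-- B replaces A's char-by-char quote-state machine by a span-based scanner (whole quoted
-- runs sliced at once, operators found by longest-prefix table lookup); objective: simpler.

-- ===== PORT A =====
-- A's while loop over index i with in_squote/in_dquote state, transliterated as a
-- recursion over the remaining characters carrying the same two booleans.
def padAgo : List Char → Bool → Bool → List Char
  | [], _, _ => []
  | c :: rest, sq, dq =>
    if sq then
      c :: padAgo rest (if c = '\'' then false else sq) dq
    else if dq then
      if c = '\\' ∧ rest ≠ [] then
        (c :: rest.take 1) ++ padAgo (rest.drop 1) sq dq
      else
        c :: padAgo rest sq (if c = '"' then false else dq)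
    else if c = '\\' ∧ rest ≠ [] then
      (c :: rest.take 1) ++ padAgo (rest.drop 1) sq dq
    else if c = '\'' then
      c :: padAgo rest true dq
    else if c = '"' then
      c :: padAgo rest sq true
    else
      -- three = s[i:i+3], two = s[i:i+2]
      let three := c :: rest.take 2
      if three = ['&','>','>'] ∨ three = ['1','>','>'] ∨ three = ['2','>','>'] then
        ' ' :: (three ++ (' ' :: padAgo (rest.drop 2) sq dq))
      else
        let two := c :: rest.take 1
        if two = ['&','&'] ∨ two = ['|','|'] ∨ two = ['>','>'] ∨ two = ['>','|'] ∨
           two = ['<','>'] ∨ two = ['&','>'] ∨ two = ['1','>'] ∨ two = ['2','>'] then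
          ' ' :: (two ++ (' ' :: padAgo (rest.drop 1) sq dq))
        else if c = '|' ∨ c = ';' ∨ c = '&' ∨ c = '<' ∨ c = '>' then
          ' ' :: c :: ' ' :: padAgo rest sq dq
        else
          c :: padAgo rest sq dq
termination_by cs => cs.length
decreasing_by all_goals (simp_all; try omega)

def pad_shell_metachars_py (s : String) : String := String.ofList (padAgo s.toList false false)

-- ===== PORT B =====
-- Source B: span for a single-quoted run starting after the opening quote (s.find).
def squoteSpan : List Char → List Char × List Char
  | [] => ([], [])
  | d :: t =>
    if d = '\'' then ([d], t)
    else (d :: (squoteSpan t).1, (squoteSpan t).2)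

-- Source B: span of a double-quoted run after the opening quote (inner while over j).
def dquoteSpan : List Char → List Char × List Char
  | [] => ([], [])
  | d :: t =>
    if d = '"' then ([d], t)
    else if d = '\\' ∧ t ≠ [] then
      (d :: t.take 1 ++ (dquoteSpan (t.drop 1)).1, (dquoteSpan (t.drop 1)).2)
    else (d :: (dquoteSpan t).1, (dquoteSpan t).2)
termination_by t => t.length
decreasing_by all_goals simp

theorem squoteSpan_snd_le (t : List Char) : (squoteSpan t).2.length ≤ t.length := by
  fun_induction squoteSpan t <;> simp_all <;> omega

theorem dquoteSpan_snd_le (t : List Char) : (dquoteSpan t).2.length ≤ t.length := by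
  fun_induction dquoteSpan t <;> simp_all <;> omega

-- Source B's _OPS table, longest first.
def padOps : List (List Char) :=
  [['&','>','>'], ['1','>','>'], ['2','>','>'], ['&','&'], ['|','|'], ['>','>'],
   ['>','|'], ['<','>'], ['&','>'], ['1','>'], ['2','>']]

-- Source B: main loop — whole quoted spans and escape pairs copied, first matching
-- operator prefix from the table padded, single metachars padded, rest verbatim.
def padBgo : List Char → List Char
  | [] => []
  | c :: rest =>
    if c = '\'' then
      c :: ((squoteSpan rest).1 ++ padBgo (squoteSpan rest).2)
    else if c = '"' then
      c :: ((dquoteSpan rest).1 ++ padBgo (dquoteSpan rest).2)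
    else if c = '\\' then
      (c :: rest.take 1) ++ padBgo (rest.drop 1)  -- s[i:i+2]: the escape pair, or a lone trailing backslash
    else
      match h : padOps.find? (fun op => op.isPrefixOf (c :: rest)) with
      | some op => (' ' :: (op ++ [' '])) ++ padBgo ((c :: rest).drop op.length)
      | none =>
        if c = '|' ∨ c = ';' ∨ c = '&' ∨ c = '<' ∨ c = '>' then
          ' ' :: c :: ' ' :: padBgo rest
        else
          c :: padBgo rest
termination_by cs => cs.length
decreasing_by
  all_goals
    first
    | (have hle := squoteSpan_snd_le rest; simp; omega)
    | (have hle := dquoteSpan_snd_le rest; simp; omega)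
    | (have hmem := List.mem_of_find?_eq_some h
       have hlen : 1 ≤ op.length := (by decide : ∀ o ∈ padOps, 1 ≤ o.length) op hmem
       simp [List.length_drop]; omega)
    | (simp; omega)
    | simp

def pad_shell_metachars_py_alt (s : String) : String := String.ofList (padBgo s.toList)

-- ===== PRECONDITION & SPEC =====
def Spec_pad_shell_metachars_py (s : String) (out : String) : Prop := out = pad_shell_metachars_py_alt s
instance (s : String) (out : String) : Decidable (Spec_pad_shell_metachars_py s out) := by unfold Spec_pad_shell_metachars_py; infer_instance

-- ===== CLAIM (what is proved, stated in full; the proofs are below) =====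
def Claim_equal_pad_shell_metachars_py : Prop := ∀ (s : String), Dom_pad_shell_metachars_py s → Spec_pad_shell_metachars_py s (pad_shell_metachars_py s)

-- ===== LEMMAS AND PROOFS =====

-- Running A inside a single-quoted run equals copying the span and resuming outside.
theorem padA_squote (t : List Char) :
    padAgo t true false = (squoteSpan t).1 ++ padAgo (squoteSpan t).2 false false := by
  fun_induction squoteSpan t <;> simp_all [padAgo]

-- Running A inside a double-quoted run equals copying the span and resuming outside.
theorem padA_dquote (t : List Char) :
    padAgo t false true = (dquoteSpan t).1 ++ padAgo (dquoteSpan t).2 false false := by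
  fun_induction dquoteSpan t <;> simp_all [padAgo]

set_option maxHeartbeats 1600000 in
set_option maxRecDepth 16384 in
theorem padA_eq_padB (cs : List Char) : padAgo cs false false = padBgo cs := by
  fun_induction padBgo cs with
  | case1 => simp [padAgo]
  | case2 t ih => simp [padAgo, padA_squote, ih]
  | case3 t h1 ih => simp [padAgo, padA_dquote, ih]
  | case4 t h1 h2 ih => cases t <;> simp_all [padAgo]
  | case5 d t h1 h2 h3 op hfind ih =>
    rcases t with _ | ⟨e1, _ | ⟨e2, t2⟩⟩
    · simp [padOps, List.find?, List.isPrefixOf] at hfind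
    · simp only [padOps, List.find?, List.isPrefixOf] at hfind
      repeat' split at hfind
      all_goals
        first
          | (simp only [reduceCtorEq] at hfind)
          | (obtain rfl := Option.some.inj hfind
             simp_all [padAgo, @eq_comm Char])
    · simp only [padOps, List.find?, List.isPrefixOf] at hfind
      repeat' split at hfind
      all_goals
        first
          | (simp only [reduceCtorEq] at hfind)
          | (obtain rfl := Option.some.inj hfind
             simp_all [padAgo, @eq_comm Char])
  | case6 d t h1 h2 h3 hfind hsingle ih =>
    rw [List.find?_eq_none] at hfind
    have key : ∀ p ∈ padOps, ¬ p <+: d :: t := fun p hp => by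
      simpa [List.isPrefixOf_iff_prefix] using hfind p hp
    have k3 : ¬(d = '&' ∧ t.take 2 = ['>','>'] ∨ d = '1' ∧ t.take 2 = ['>','>'] ∨
        d = '2' ∧ t.take 2 = ['>','>']) := by
      rintro (⟨rfl, hk⟩ | ⟨rfl, hk⟩ | ⟨rfl, hk⟩)
      · exact key ['&','>','>'] (by simp [padOps]) (List.cons_prefix_cons.mpr ⟨rfl, hk ▸ List.take_prefix 2 t⟩)
      · exact key ['1','>','>'] (by simp [padOps]) (List.cons_prefix_cons.mpr ⟨rfl, hk ▸ List.take_prefix 2 t⟩)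
      · exact key ['2','>','>'] (by simp [padOps]) (List.cons_prefix_cons.mpr ⟨rfl, hk ▸ List.take_prefix 2 t⟩)
    have k2 : ¬(d = '&' ∧ t.take 1 = ['&'] ∨ d = '|' ∧ t.take 1 = ['|'] ∨ d = '>' ∧ t.take 1 = ['>'] ∨
        d = '>' ∧ t.take 1 = ['|'] ∨ d = '<' ∧ t.take 1 = ['>'] ∨ d = '&' ∧ t.take 1 = ['>'] ∨
        d = '1' ∧ t.take 1 = ['>'] ∨ d = '2' ∧ t.take 1 = ['>']) := by
      rintro (⟨rfl, hk⟩ | ⟨rfl, hk⟩ | ⟨rfl, hk⟩ | ⟨rfl, hk⟩ | ⟨rfl, hk⟩ | ⟨rfl, hk⟩ | ⟨rfl, hk⟩ | ⟨rfl, hk⟩)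
      · exact key ['&','&'] (by simp [padOps]) (List.cons_prefix_cons.mpr ⟨rfl, hk ▸ List.take_prefix 1 t⟩)
      · exact key ['|','|'] (by simp [padOps]) (List.cons_prefix_cons.mpr ⟨rfl, hk ▸ List.take_prefix 1 t⟩)
      · exact key ['>','>'] (by simp [padOps]) (List.cons_prefix_cons.mpr ⟨rfl, hk ▸ List.take_prefix 1 t⟩)
      · exact key ['>','|'] (by simp [padOps]) (List.cons_prefix_cons.mpr ⟨rfl, hk ▸ List.take_prefix 1 t⟩)
      · exact key ['<','>'] (by simp [padOps]) (List.cons_prefix_cons.mpr ⟨rfl, hk ▸ List.take_prefix 1 t⟩)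
      · exact key ['&','>'] (by simp [padOps]) (List.cons_prefix_cons.mpr ⟨rfl, hk ▸ List.take_prefix 1 t⟩)
      · exact key ['1','>'] (by simp [padOps]) (List.cons_prefix_cons.mpr ⟨rfl, hk ▸ List.take_prefix 1 t⟩)
      · exact key ['2','>'] (by simp [padOps]) (List.cons_prefix_cons.mpr ⟨rfl, hk ▸ List.take_prefix 1 t⟩)
    simp [padAgo, h1, h2, h3]
    rw [if_neg k3, if_neg k2, if_pos hsingle, ih]
  | case7 d t h1 h2 h3 hfind hsingle ih =>
    rw [List.find?_eq_none] at hfind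
    have key : ∀ p ∈ padOps, ¬ p <+: d :: t := fun p hp => by
      simpa [List.isPrefixOf_iff_prefix] using hfind p hp
    have k3 : ¬(d = '&' ∧ t.take 2 = ['>','>'] ∨ d = '1' ∧ t.take 2 = ['>','>'] ∨
        d = '2' ∧ t.take 2 = ['>','>']) := by
      rintro (⟨rfl, hk⟩ | ⟨rfl, hk⟩ | ⟨rfl, hk⟩)
      · exact key ['&','>','>'] (by simp [padOps]) (List.cons_prefix_cons.mpr ⟨rfl, hk ▸ List.take_prefix 2 t⟩)
      · exact key ['1','>','>'] (by simp [padOps]) (List.cons_prefix_cons.mpr ⟨rfl, hk ▸ List.take_prefix 2 t⟩)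
      · exact key ['2','>','>'] (by simp [padOps]) (List.cons_prefix_cons.mpr ⟨rfl, hk ▸ List.take_prefix 2 t⟩)
    have k2 : ¬(d = '&' ∧ t.take 1 = ['&'] ∨ d = '|' ∧ t.take 1 = ['|'] ∨ d = '>' ∧ t.take 1 = ['>'] ∨
        d = '>' ∧ t.take 1 = ['|'] ∨ d = '<' ∧ t.take 1 = ['>'] ∨ d = '&' ∧ t.take 1 = ['>'] ∨
        d = '1' ∧ t.take 1 = ['>'] ∨ d = '2' ∧ t.take 1 = ['>']) := by
      rintro (⟨rfl, hk⟩ | ⟨rfl, hk⟩ | ⟨rfl, hk⟩ | ⟨rfl, hk⟩ | ⟨rfl, hk⟩ | ⟨rfl, hk⟩ | ⟨rfl, hk⟩ | ⟨rfl, hk⟩)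
      · exact key ['&','&'] (by simp [padOps]) (List.cons_prefix_cons.mpr ⟨rfl, hk ▸ List.take_prefix 1 t⟩)
      · exact key ['|','|'] (by simp [padOps]) (List.cons_prefix_cons.mpr ⟨rfl, hk ▸ List.take_prefix 1 t⟩)
      · exact key ['>','>'] (by simp [padOps]) (List.cons_prefix_cons.mpr ⟨rfl, hk ▸ List.take_prefix 1 t⟩)
      · exact key ['>','|'] (by simp [padOps]) (List.cons_prefix_cons.mpr ⟨rfl, hk ▸ List.take_prefix 1 t⟩)
      · exact key ['<','>'] (by simp [padOps]) (List.cons_prefix_cons.mpr ⟨rfl, hk ▸ List.take_prefix 1 t⟩)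
      · exact key ['&','>'] (by simp [padOps]) (List.cons_prefix_cons.mpr ⟨rfl, hk ▸ List.take_prefix 1 t⟩)
      · exact key ['1','>'] (by simp [padOps]) (List.cons_prefix_cons.mpr ⟨rfl, hk ▸ List.take_prefix 1 t⟩)
      · exact key ['2','>'] (by simp [padOps]) (List.cons_prefix_cons.mpr ⟨rfl, hk ▸ List.take_prefix 1 t⟩)
    simp [padAgo, h1, h2, h3]
    rw [if_neg k3, if_neg k2, if_neg hsingle, ih]

-- ===== VERDICT (by name: the statement is the Claim_ definition above) =====
theorem pad_shell_metachars_py_spec : Claim_equal_pad_shell_metachars_py := by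
  intro s _
  unfold Spec_pad_shell_metachars_py pad_shell_metachars_py pad_shell_metachars_py_alt
  exact congrArg String.ofList (padA_eq_padB s.toList)
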